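-- pv_equiv track=rewrite | github.com/autogluon/tabrepo | scripts/run_generate_amlb_config.py | construct_hyperparameters_dict
-- ===== SOURCE A (Python) =====
-- def construct_hyperparameters_dict(configs) -> dict:
--     hyperparameters_dict = {}
--
--     for name in configs:
--         config = configs[name]
--         hyperparameters = config['hyperparameters']
--         model_type = config['model_type']
--
--         if model_type not in hyperparameters_dict:
--             hyperparameters_dict[model_type] = []
--
--         hyperparameters_dict[model_type].append(hyperparameters)
--
--     return hyperparameters_dict
-- ===== SOURCE B (Python) =====
-- def construct_hyperparameters_dict(configs) -> dict:
--     rows = [(config['model_type'], config['hyperparameters']) for config in configs.values()]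
--     order = dict.fromkeys(mt for mt, _ in rows)
--     return {mt: [hp for m, hp in rows if m == mt] for mt in order}
-- ===== Notes on version B (the rewrite author's own statement) =====
-- stated objective: alternative
-- what changed: Replaces the single-pass bucket-dispatch dict building (create-bucket-if-missing then append) by a two-phase grouping: extract (model_type, hyperparameters) rows once, take the ordered distinct model types via dict.fromkeys, and build each group with one filtering comprehension over the rows.
import Mathlib
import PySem

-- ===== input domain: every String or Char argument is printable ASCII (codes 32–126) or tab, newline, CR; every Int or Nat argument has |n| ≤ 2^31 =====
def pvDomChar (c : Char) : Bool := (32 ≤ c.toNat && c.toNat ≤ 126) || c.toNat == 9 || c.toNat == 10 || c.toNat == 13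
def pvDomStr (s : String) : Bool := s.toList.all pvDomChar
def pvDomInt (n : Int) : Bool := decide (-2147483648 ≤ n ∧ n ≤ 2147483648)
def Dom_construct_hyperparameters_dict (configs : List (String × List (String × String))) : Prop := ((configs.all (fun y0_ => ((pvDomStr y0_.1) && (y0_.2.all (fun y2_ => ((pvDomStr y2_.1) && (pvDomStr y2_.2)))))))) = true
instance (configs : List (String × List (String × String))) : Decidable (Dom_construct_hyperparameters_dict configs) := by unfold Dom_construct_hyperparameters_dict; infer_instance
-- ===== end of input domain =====

-- B groups by a two-phase pass (extract rows, ordered distinct model types, one filter per type)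
-- instead of A's single-pass bucket dispatch; an alternative decomposition, not claimed faster.

-- ===== PORT A =====
def construct_hyperparameters_dict (configs : List (String × List (String × String))) : List (String × List String) :=
  let d := PySem.Dict.ofList configs
  (d.keys.foldl (fun hyperparameters_dict name =>
      let config := PySem.Dict.ofList (d.getD name [])
      let hyperparameters := config.getD "hyperparameters" ""
      let model_type := config.getD "model_type" ""
      let hyperparameters_dict :=
        if hyperparameters_dict.contains model_type = false
        then hyperparameters_dict.insert model_type ([] : List String)
        else hyperparameters_dict
      hyperparameters_dict.modify model_type [] (fun l => l ++ [hyperparameters]))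
    PySem.Dict.empty).items

-- ===== PORT B =====
def construct_hyperparameters_dict_alt (configs : List (String × List (String × String))) : List (String × List String) :=
  let rows := (PySem.Dict.ofList configs).values.map (fun c =>
      let cd := PySem.Dict.ofList c
      (cd.getD "model_type" "", cd.getD "hyperparameters" ""))
  let order := PySem.List.dedup (rows.map Prod.fst)
  order.map (fun mt => (mt, (rows.filter (fun r => r.1 == mt)).map Prod.snd))

-- ===== PRECONDITION & SPEC =====
-- Pre_ excludes exactly the inputs on which Python A raises KeyError (and B raises it too):
-- a config value of the dict built from configs missing the 'hyperparameters' or 'model_type' key.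
def Pre_construct_hyperparameters_dict (configs : List (String × List (String × String))) : Prop :=
  ∀ p ∈ (PySem.Dict.ofList configs).items,
    "hyperparameters" ∈ p.2.map Prod.fst ∧ "model_type" ∈ p.2.map Prod.fst
instance (configs : List (String × List (String × String))) : Decidable (Pre_construct_hyperparameters_dict configs) := by unfold Pre_construct_hyperparameters_dict; infer_instance
def pvWitness_construct_hyperparameters_dict : (List (String × List (String × String))) :=
  [("c1", [("model_type", "GBM"), ("hyperparameters", "{}")]),
   ("c2", [("model_type", "NN"), ("hyperparameters", "{'lr': 0.1}")])]

def Spec_construct_hyperparameters_dict (configs : List (String × List (String × String))) (out : List (String × List String)) : Prop := out = construct_hyperparameters_dict_alt configs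
instance (configs : List (String × List (String × String))) (out : List (String × List String)) : Decidable (Spec_construct_hyperparameters_dict configs out) := by unfold Spec_construct_hyperparameters_dict; infer_instance

-- ===== CLAIM (what is proved, stated in full; the proofs are below) =====
def Claim_equal_construct_hyperparameters_dict : Prop := ∀ (configs : List (String × List (String × String))), Dom_construct_hyperparameters_dict configs → Pre_construct_hyperparameters_dict configs → Spec_construct_hyperparameters_dict configs (construct_hyperparameters_dict configs)

-- ===== LEMMAS AND PROOFS =====

-- the body of A's loop, seen as a function of the (model_type, hyperparameters) row
def pvStep (hd : PySem.Dict String (List String)) (r : String × String) : PySem.Dict String (List String) :=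
  (if hd.contains r.1 = false then hd.insert r.1 [] else hd).modify r.1 [] (fun l => l ++ [r.2])

-- the (model_type, hyperparameters) row extracted from the config named `name`
def pvRow (d : PySem.Dict String (List (String × String))) (name : String) : String × String :=
  let cd := PySem.Dict.ofList (d.getD name [])
  (cd.getD "model_type" "", cd.getD "hyperparameters" "")

lemma pvStep_eq (hd : PySem.Dict String (List String)) (r : String × String) :
    pvStep hd r = hd.modify r.1 [] (fun l => l ++ [r.2]) := by
  unfold pvStep
  by_cases h : hd.contains r.1 = false
  · rw [if_pos h]
    simp [PySem.Dict.modify, PySem.Dict.getD_insert_self, PySem.Dict.insert_insert_self,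
      PySem.Dict.getD_of_not_contains hd _ h]
  · rw [if_neg h]

-- the core equality: A's bucket-dispatch fold over any row list yields B's group-by-filter table
lemma pvCore (rows : List (String × String)) :
    (rows.foldl pvStep PySem.Dict.empty).items
      = (PySem.List.dedup (rows.map Prod.fst)).map
          (fun mt => (mt, (rows.filter (fun r => r.1 == mt)).map Prod.snd)) := by
  have hstep : pvStep = fun hd r => hd.modify r.1 [] (fun l => l ++ [r.2]) :=
    funext fun hd => funext fun r => pvStep_eq hd r
  rw [hstep]
  have hnd : (rows.foldl (fun hd (r : String × String) => hd.modify r.1 [] (fun l => l ++ [r.2])) PySem.Dict.empty).keys.Nodup :=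
    PySem.Dict.nodup_keys_foldl_modify_key rows Prod.fst [] (fun _ r => fun l => l ++ [r.2]) _ (by simp)
  rw [PySem.Dict.items_eq_map_keys _ hnd []]
  rw [PySem.Dict.keys_foldl_modify_key rows Prod.fst [] (fun _ r => fun l => l ++ [r.2])]
  have hkeys : PySem.Set.update (PySem.Dict.empty : PySem.Dict String (List String)).keys (rows.map Prod.fst) = PySem.List.dedup (rows.map Prod.fst) := by
    simp only [PySem.List.dedup, PySem.Dict.keys_empty, PySem.Set.update_nil_left]
  rw [hkeys]
  apply List.map_congr_left
  intro mt _
  have := PySem.Dict.getD_foldl_modify_append rows PySem.Dict.empty mt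
  simp only [PySem.Dict.getD_empty, List.nil_append] at this
  rw [this]

lemma pvMain (configs : List (String × List (String × String))) :
    construct_hyperparameters_dict configs = construct_hyperparameters_dict_alt configs := by
  have hvals : (PySem.Dict.ofList configs).values.map (fun c =>
      let cd := PySem.Dict.ofList c
      (cd.getD "model_type" "", cd.getD "hyperparameters" "")) =
      (PySem.Dict.ofList configs).keys.map (pvRow (PySem.Dict.ofList configs)) := by
    have h1 : (PySem.Dict.ofList configs).items =
        (PySem.Dict.ofList configs).keys.map (fun k => (k, (PySem.Dict.ofList configs).getD k [])) :=
      PySem.Dict.items_eq_map_keys _ (PySem.Dict.nodup_keys_ofList configs) []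
    have h2 : (PySem.Dict.ofList configs).values = (PySem.Dict.ofList configs).items.map Prod.snd := rfl
    rw [h2, h1]
    simp [List.map_map, pvRow, Function.comp]
  show ((PySem.Dict.ofList configs).keys.foldl
      (fun hd n => pvStep hd (pvRow (PySem.Dict.ofList configs) n)) PySem.Dict.empty).items
    = (PySem.List.dedup ((((PySem.Dict.ofList configs).values.map (fun c =>
        let cd := PySem.Dict.ofList c
        (cd.getD "model_type" "", cd.getD "hyperparameters" ""))).map Prod.fst))).map
        (fun mt => (mt, (((PySem.Dict.ofList configs).values.map (fun c =>
          let cd := PySem.Dict.ofList c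
          (cd.getD "model_type" "", cd.getD "hyperparameters" ""))).filter (fun r => r.1 == mt)).map Prod.snd))
  rw [hvals, ← List.foldl_map (f := pvRow (PySem.Dict.ofList configs)) (g := pvStep)]
  exact pvCore _

-- ===== VERDICT (by name: the statement is the Claim_ definition above) =====
theorem construct_hyperparameters_dict_spec : Claim_equal_construct_hyperparameters_dict := by
  intro configs _ _
  exact pvMain configs
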